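-- pv_equiv track=rewrite | github.com/aronboliveira/music-mood-auto-catalog | scripts/apply_keyword_scrub.py | build_keyword_index
-- ===== SOURCE A (Python) =====
-- def build_keyword_index(table: dict[str, str]):
--     """Build a fast lookup structure: list of (lowercase_key, replacement) sorted longest-first."""
--     entries = []
--     seen = set()
--     for k, v in table.items():
--         low = k.lower()
--         if low not in seen:
--             seen.add(low)
--             entries.append((low, v))
--     entries.sort(key=lambda x: -len(x[0]))
--     return entries
-- ===== SOURCE B (Python) =====
-- def build_keyword_index(table: dict[str, str]):
--     """Build a fast lookup structure: list of (lowercase_key, replacement) sorted longest-first."""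
--     first = {}
--     for k, v in table.items():
--         first.setdefault(k.lower(), v)
--     buckets = {}
--     for low, v in first.items():
--         buckets.setdefault(len(low), []).append((low, v))
--     out = []
--     for length in sorted(buckets, reverse=True):
--         out.extend(buckets[length])
--     return out
-- ===== Notes on version B (the rewrite author's own statement) =====
-- stated objective: alternative
-- what changed: Dedup now keeps the first occurrence via dict.setdefault instead of a seen-set/list pair, and the longest-first order is produced by bucketing entries by key length and concatenating buckets in descending length order (a bucket/counting sort) instead of a comparison sort with a negated-length key.
import Mathlib
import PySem

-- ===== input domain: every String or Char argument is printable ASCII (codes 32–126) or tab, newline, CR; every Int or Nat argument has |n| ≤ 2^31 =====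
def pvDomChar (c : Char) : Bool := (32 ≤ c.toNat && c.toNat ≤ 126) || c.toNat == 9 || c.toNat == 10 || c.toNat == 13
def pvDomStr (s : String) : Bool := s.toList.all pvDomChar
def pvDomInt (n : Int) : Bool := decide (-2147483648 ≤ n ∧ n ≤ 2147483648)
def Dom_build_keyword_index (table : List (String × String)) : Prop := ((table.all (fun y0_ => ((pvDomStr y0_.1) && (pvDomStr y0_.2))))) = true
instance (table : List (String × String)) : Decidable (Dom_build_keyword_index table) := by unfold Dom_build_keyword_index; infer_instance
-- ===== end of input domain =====

-- B replaces A's seen-set dedup with dict.setdefault and A's negated-length comparison sort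
-- with length buckets concatenated in descending length order (alternative decomposition, same result).


-- ===== PORT A =====
def build_keyword_index (table : List (String × String)) : List (String × String) :=
  let st := table.foldl
    (fun (p : List (String × String) × PySem.Set String) kv =>
      let low := PySem.Str.lower kv.1
      if PySem.Set.contains p.2 low then p
      else (p.1 ++ [(low, kv.2)], PySem.Set.add p.2 low))
    ([], PySem.Set.empty)
  PySem.List.sorted st.1 (fun x => -(PySem.Str.len x.1)) false

-- ===== PORT B =====
def build_keyword_index_alt (table : List (String × String)) : List (String × String) :=
  let first := table.foldl
    (fun d kv => PySem.Dict.setdefault d (PySem.Str.lower kv.1) kv.2) PySem.Dict.empty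
  let buckets := first.items.foldl
    (fun d p => PySem.Dict.modify d (PySem.Str.len p.1) [] (fun l => l ++ [p])) PySem.Dict.empty
  (PySem.List.sorted (PySem.Dict.keys buckets) (fun x => x) true).foldl
    (fun acc len => acc ++ PySem.Dict.getD buckets len []) []

-- ===== PRECONDITION & SPEC =====
-- Pre_ excludes only association lists with a repeated exact key: a Python dict cannot hold
-- duplicate keys, and on such lists the list→dict conversion keeps the last value while the
-- ports' item-by-item iteration keeps the first — a corner no dict-typed caller can reach.
def Pre_build_keyword_index (table : List (String × String)) : Prop :=
  (table.map Prod.fst).Nodup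
instance (table : List (String × String)) : Decidable (Pre_build_keyword_index table) := by
  unfold Pre_build_keyword_index; infer_instance
def pvWitness_build_keyword_index : (List (String × String)) :=
  [("Ab", "x"), ("c", "y"), ("aB", "z")]
def Spec_build_keyword_index (table : List (String × String)) (out : List (String × String)) : Prop := out = build_keyword_index_alt table
instance (table : List (String × String)) (out : List (String × String)) : Decidable (Spec_build_keyword_index table out) := by unfold Spec_build_keyword_index; infer_instance

-- ===== CLAIM (what is proved, stated in full; the proofs are below) =====
def Claim_equal_build_keyword_index : Prop := ∀ (table : List (String × String)), Dom_build_keyword_index table → Pre_build_keyword_index table → Spec_build_keyword_index table (build_keyword_index table)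

-- ===== LEMMAS AND PROOFS =====

-- insertBy's cons unfolding.
lemma insertBy_cons {α : Type} (before : α → α → Bool) (x y : α) (ys : List α) :
    PySem.List.insertBy before x (y :: ys)
      = if before x y then x :: y :: ys else y :: PySem.List.insertBy before x ys := by
  simp [PySem.List.insertBy]

-- insertBy goes to the front when it goes before everything.
lemma insertBy_front {α : Type} (before : α → α → Bool) (x : α)
    (ys : List α) (h : ∀ y ∈ ys, before x y = true) :
    PySem.List.insertBy before x ys = x :: ys := by
  cases ys with
  | nil => rfl
  | cons y t => simp [insertBy_cons, h y (by simp)]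

-- insertBy skips a block it does not go before.
lemma insertBy_append_of_not_before {α : Type} (before : α → α → Bool) (x : α)
    (G rest : List α) (h : ∀ y ∈ G, before x y = false) :
    PySem.List.insertBy before x (G ++ rest) = G ++ PySem.List.insertBy before x rest := by
  induction G with
  | nil => rfl
  | cons y t ih =>
    simp only [List.cons_append, insertBy_cons, h y (by simp)]
    simp [ih (fun z hz => h z (by simp [hz]))]

-- Inserting x into a descending group concatenation appends x to its own group.
lemma insertBy_groups {α : Type} (f : α → Int) (x : α) (E : List α) :
    ∀ (L : List Int), L.Pairwise (· > ·) → f x ∈ L →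
      PySem.List.insertBy (fun a b => decide (-(f a) < -(f b))) x
          (L.flatMap (fun c => E.filter (fun y => f y == c)))
        = L.flatMap (fun c => (E ++ [x]).filter (fun y => f y == c)) := by
  intro L
  induction L with
  | nil => simp
  | cons c L' ih =>
    intro hp hm
    have hgt : ∀ c' ∈ L', c > c' := fun c' h => List.rel_of_pairwise_cons hp h
    have hGf : ∀ y ∈ E.filter (fun y => f y == c), f y = c := by
      intro y hy; simpa using (List.of_mem_filter hy)
    by_cases hc : f x = c
    · -- x belongs to the first group
      have hGfalse : ∀ y ∈ E.filter (fun y => f y == c),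
          (fun a b => decide (-(f a) < -(f b))) x y = false := by
        intro y hy; simp [hGf y hy, hc]
      have hxL' : f x ∉ L' := fun h => absurd (hgt _ h) (by simp [hc])
      have hrest : ∀ y ∈ L'.flatMap (fun c => E.filter (fun y => f y == c)),
          (fun a b => decide (-(f a) < -(f b))) x y = true := by
        intro y hy
        obtain ⟨c', hc', hy'⟩ := List.mem_flatMap.mp hy
        have hfy : f y = c' := by simpa using (List.of_mem_filter hy')
        have hlt := hgt c' hc'
        simp [hfy]; omega
      rw [List.flatMap_cons, insertBy_append_of_not_before _ _ _ _ hGfalse,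
        insertBy_front _ _ _ hrest]
      have : L'.flatMap (fun c => (E ++ [x]).filter (fun y => f y == c))
          = L'.flatMap (fun c => E.filter (fun y => f y == c)) := by
        apply List.flatMap_congr
        intro c' hc'
        have : f x ≠ c' := fun h => hxL' (h ▸ hc')
        simp [List.filter_append, this]
      conv_rhs => rw [List.flatMap_cons, this]
      simp [List.filter_append, hc]
    · -- x belongs to a later group
      have hxL' : f x ∈ L' := Or.resolve_left (List.mem_cons.mp hm) hc
      have hGfalse : ∀ y ∈ E.filter (fun y => f y == c),
          (fun a b => decide (-(f a) < -(f b))) x y = false := by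
        intro y hy
        have h1 : f y = c := hGf y hy
        have h2 : c > f x := hgt _ hxL'
        simp [h1]; omega
      rw [List.flatMap_cons, insertBy_append_of_not_before _ _ _ _ hGfalse,
        ih (List.Pairwise.sublist (List.sublist_cons_self c L') hp) hxL']
      simp [List.flatMap_cons, List.filter_append, hc]

-- A stable ascending sort by negated key is the descending groups, each in original order.
lemma stable_sort_groups {α : Type} (f : α → Int) (E : List α) (L : List Int)
    (hL : L.Pairwise (· > ·)) (hmem : ∀ x ∈ E, f x ∈ L) :
    PySem.List.sorted E (fun x => -(f x)) false
      = L.flatMap (fun c => E.filter (fun y => f y == c)) := by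
  induction E using List.reverseRecOn with
  | nil => simp [PySem.List.sorted_eq_foldl_insertBy]
  | append_singleton E' x ih =>
    rw [PySem.List.sorted_eq_foldl_insertBy, List.foldl_append, List.foldl_cons, List.foldl_nil,
      ← PySem.List.sorted_eq_foldl_insertBy,
      ih (fun y hy => hmem y (by simp [hy]))]
    exact insertBy_groups f x E' L hL (hmem x (by simp))

-- 'low in seen' for A's seen set is 'low in first' for B's dict.
lemma contains_keys (d : PySem.Dict String String) (k : String) :
    PySem.Set.contains d.keys k = d.contains k := by
  rw [PySem.Dict.contains_eq_decide_mem_keys]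
  simp [PySem.Set.contains]

-- The two dedup loops compute the same entries: A's (entries, seen) pair is B's dict's (items, keys).
lemma dedup_loops_agree (table : List (String × String)) :
    ∀ (d : PySem.Dict String String),
      table.foldl
        (fun (p : List (String × String) × PySem.Set String) kv =>
          let low := PySem.Str.lower kv.1
          if PySem.Set.contains p.2 low then p
          else (p.1 ++ [(low, kv.2)], PySem.Set.add p.2 low))
        (d.items, d.keys)
      = ((table.foldl (fun d kv => PySem.Dict.setdefault d (PySem.Str.lower kv.1) kv.2) d).items,
         (table.foldl (fun d kv => PySem.Dict.setdefault d (PySem.Str.lower kv.1) kv.2) d).keys) := by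
  induction table with
  | nil => intro d; rfl
  | cons kv t ih =>
    intro d
    rw [List.foldl_cons, List.foldl_cons]
    by_cases hc : d.contains (PySem.Str.lower kv.1) = true
    · simp only [contains_keys, hc, if_pos, PySem.Dict.setdefault_of_contains _ _ hc]
      exact ih d
    · have hc' : d.contains (PySem.Str.lower kv.1) = false := by simpa using hc
      simp only [PySem.Dict.setdefault_of_not_contains _ _ hc', PySem.Set.add,
        PySem.Set.contains]
      have h1 := PySem.Dict.items_insert_of_not_contains d kv.2 (k := PySem.Str.lower kv.1) hc'
      have h2 := PySem.Dict.keys_insert_of_not_contains d kv.2 (k := PySem.Str.lower kv.1) hc'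
      have h3 : (d.keys : List String).contains (PySem.Str.lower kv.1) = false := by
        rw [show (d.keys).contains (PySem.Str.lower kv.1)
            = PySem.Set.contains d.keys (PySem.Str.lower kv.1) from rfl, contains_keys]
        exact hc'
      rw [h3]
      simpa only [h1, h2] using ih (d.insert (PySem.Str.lower kv.1) kv.2)

-- B's bucket dict: its keys are the distinct lengths in first-appearance order …
lemma buckets_keys (E : List (String × String)) :
    (E.foldl (fun d p => PySem.Dict.modify d (PySem.Str.len p.1) [] (fun l => l ++ [p])) PySem.Dict.empty).keys
      = PySem.Set.ofList (E.map (fun p => PySem.Str.len p.1)) := by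
  have h := PySem.Dict.keys_foldl_modify_key E (fun p => PySem.Str.len p.1)
    ([] : List (String × String)) (fun d p => fun l => l ++ [p]) PySem.Dict.empty
  simpa using h

-- … and each bucket is the in-order filter of the entries with that key length.
lemma buckets_getD (E : List (String × String)) (c : Int) :
    (E.foldl (fun d p => PySem.Dict.modify d (PySem.Str.len p.1) [] (fun l => l ++ [p])) PySem.Dict.empty).getD c []
      = E.filter (fun p => PySem.Str.len p.1 == c) := by
  rw [show (E.foldl (fun d p => PySem.Dict.modify d (PySem.Str.len p.1) [] (fun l => l ++ [p])) PySem.Dict.empty)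
      = (E.map (fun p => (PySem.Str.len p.1, p))).foldl (fun d q => PySem.Dict.modify d q.1 [] (fun l => l ++ [q.2])) PySem.Dict.empty
    from (List.foldl_map (f := fun p : String × String => (PySem.Str.len p.1, p))
      (g := fun d (q : Int × (String × String)) => PySem.Dict.modify d q.1 [] (fun l => l ++ [q.2]))
      (l := E) (init := PySem.Dict.empty)).symm]
  rw [PySem.Dict.getD_foldl_modify_append]
  simp only [PySem.Dict.getD_empty, List.nil_append, List.filter_map]
  rw [List.map_map]
  simp [Function.comp_def]

lemma ports_agree (table : List (String × String)) :
    build_keyword_index table = build_keyword_index_alt table := by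
  unfold build_keyword_index build_keyword_index_alt
  have hded := dedup_loops_agree table PySem.Dict.empty
  rw [show (([] : List (String × String)), (PySem.Set.empty : PySem.Set String))
      = ((PySem.Dict.empty : PySem.Dict String String).items, (PySem.Dict.empty : PySem.Dict String String).keys) from rfl,
    hded]
  set D := table.foldl (fun d kv => PySem.Dict.setdefault d (PySem.Str.lower kv.1) kv.2) PySem.Dict.empty with hDdef
  set E := D.items with hEdef
  set L := PySem.List.sorted
      (PySem.Dict.keys (E.foldl (fun d p => PySem.Dict.modify d (PySem.Str.len p.1) [] (fun l => l ++ [p])) PySem.Dict.empty))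
      (fun x => x) true with hLdef
  have hLk : L = PySem.List.sorted (PySem.Set.ofList (E.map (fun p => PySem.Str.len p.1))) (fun x => x) true := by
    rw [hLdef, buckets_keys]
  have hnd : L.Nodup := by
    rw [hLk]
    exact ((PySem.List.sorted_perm _ _ _).nodup_iff).mpr (PySem.Set.nodup_ofList _)
  have hge : L.Pairwise (fun a b => b ≤ a) := by
    rw [hLk]; exact PySem.List.sorted_pairwise_rev _ _
  have hL : L.Pairwise (· > ·) := by
    refine (hnd.and hge).imp ?_
    rintro a b ⟨hne, hle⟩
    exact lt_of_le_of_ne hle (fun h => hne h.symm)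
  have hmem : ∀ x ∈ E, (fun p : String × String => PySem.Str.len p.1) x ∈ L := by
    intro x hx
    rw [hLk, PySem.List.mem_sorted, PySem.Set.mem_ofList]
    exact List.mem_map_of_mem hx
  rw [PySem.List.foldl_append_eq_flatMap, List.nil_append]
  rw [stable_sort_groups (fun p : String × String => PySem.Str.len p.1) E L hL hmem]
  refine Eq.symm (List.flatMap_congr fun c hc => ?_)
  exact buckets_getD E c

-- ===== VERDICT (by name: the statement is the Claim_ definition above) =====
theorem build_keyword_index_spec : Claim_equal_build_keyword_index := by
  intro table _ _
  unfold Spec_build_keyword_index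
  exact ports_agree table
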